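-- pv_equiv track=rewrite | github.com/MARShakib/ItransitionAssignment | assignmentTasks.py | max_multiplication
-- ===== SOURCE A (Python) =====
-- import functools
--
-- def max_multiplication(text):
--     # if not a string return 'nil'
--     if not isinstance(text, str):
--         return "nil"
--
--     result = 0
--
--     for i in range(len(text) - 3):
--         # get subset of four chars in a row
--         subText = text[i : i + 4]
--         # check all of them are numeric??
--         if all(j.isnumeric() for j in subText):
--             tempResult = functools.reduce(lambda x, y: int(x) * int(y), subText)
--             result = max(tempResult, result)
--     return result if result > 0 else "nil"
-- ===== SOURCE B (Python) =====
-- def max_multiplication(text):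
--     # One-pass state machine: track the length of the current run of numeric
--     # chars and the values of the last three digits; no slicing, no indexing.
--     if not isinstance(text, str):
--         return "nil"
--     result = 0
--     run = 0
--     d1 = d2 = d3 = 0
--     for ch in text:
--         if ch.isnumeric():
--             d0 = int(ch)
--             run += 1
--             if run >= 4:
--                 p = d1 * d2 * d3 * d0
--                 if result < p:
--                     result = p
--             d1, d2, d3 = d2, d3, d0
--         else:
--             run = 0
--     return result if result > 0 else "nil"
-- ===== Notes on version B (the rewrite author's own statement) =====
-- stated objective: faster
-- what changed: Replaced the index loop that re-slices a 4-char window and re-checks all four chars at every position with a single streaming pass that maintains the current numeric-run length and the last three digit values, so each character is examined once.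
import Mathlib
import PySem

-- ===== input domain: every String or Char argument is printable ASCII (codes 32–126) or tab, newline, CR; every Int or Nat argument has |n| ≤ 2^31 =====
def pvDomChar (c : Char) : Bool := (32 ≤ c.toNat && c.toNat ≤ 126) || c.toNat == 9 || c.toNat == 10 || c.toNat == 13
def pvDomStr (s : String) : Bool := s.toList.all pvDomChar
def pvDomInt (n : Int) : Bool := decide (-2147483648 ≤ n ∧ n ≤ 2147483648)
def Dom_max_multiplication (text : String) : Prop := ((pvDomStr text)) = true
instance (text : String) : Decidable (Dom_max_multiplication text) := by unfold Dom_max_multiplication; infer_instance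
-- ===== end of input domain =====

-- B replaces A's per-position 4-char slicing/re-checking with a single streaming
-- pass keeping the numeric-run length and the last three digit values (constant-factor speedup).
-- ===== PORT A =====
-- int(c) for a single digit char; exact on '0'..'9' (the only chars both programs apply it to inside Dom)
def pvVal (c : Char) : Int := (c.toNat : Int) - 48
-- functools.reduce(lambda x, y: int(x) * int(y), subText): left fold of the digit values
def pvReduce (ws : List Char) : Int :=
  match ws.map pvVal with
  | [] => 0            -- unreachable: reduce is only applied to 4-char windows
  | v :: vs => vs.foldl (· * ·) v
-- one iteration of A's `for i in range(len(text) - 3)` loop body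
-- (j.isnumeric() ported as Chars.isdigit: identical on the printable-ASCII domain)
def pvAStep (cs : List Char) (result : Int) (i : Int) : Int :=
  let subText := PySem.List.slice cs (some i) (some (i + 4))
  if subText.all PySem.Chars.isdigit then max (pvReduce subText) result else result
def pvALoop (cs : List Char) : Int :=
  (PySem.List.pyRange 0 ((cs.length : Int) - 3) 1).foldl (pvAStep cs) 0
def max_multiplication (text : String) : String :=
  let result := pvALoop text.toList
  if result > 0 then PySem.Int.toStr result else "nil"

-- ===== PORT B =====
-- state: (result, run, d1, d2, d3); one iteration of B's `for ch in text` loop body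
def pvBStep (s : Int × Int × Int × Int × Int) (ch : Char) : Int × Int × Int × Int × Int :=
  match s with
  | (result, run, d1, d2, d3) =>
    if PySem.Chars.isdigit ch then
      let d0 := pvVal ch
      let run := run + 1
      let result :=
        if 4 ≤ run then
          let p := d1 * d2 * d3 * d0
          if result < p then p else result
        else result
      (result, run, d2, d3, d0)
    else (result, 0, d1, d2, d3)
def max_multiplication_alt (text : String) : String :=
  let st := text.toList.foldl pvBStep (0, 0, 0, 0, 0)
  if st.1 > 0 then PySem.Int.toStr st.1 else "nil"

-- ===== PRECONDITION & SPEC =====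
def Spec_max_multiplication (text : String) (out : String) : Prop := out = max_multiplication_alt text
instance (text : String) (out : String) : Decidable (Spec_max_multiplication text out) := by unfold Spec_max_multiplication; infer_instance

-- ===== CLAIM (what is proved, stated in full; the proofs are below) =====
def Claim_equal_max_multiplication : Prop := ∀ (text : String), Dom_max_multiplication text → Spec_max_multiplication text (max_multiplication text)

-- ===== LEMMAS AND PROOFS =====

-- length of the maximal run of digit chars at the end of cs
def sufRun (cs : List Char) : Nat := (cs.reverse.takeWhile PySem.Chars.isdigit).length

lemma sufRun_append (cs : List Char) (c : Char) :
    sufRun (cs ++ [c]) = if PySem.Chars.isdigit c then sufRun cs + 1 else 0 := by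
  simp [sufRun, List.takeWhile]
  split <;> simp_all

lemma takeWhile_ge (rs : List Char) (k : Nat) (hk : k ≤ rs.length)
    (h : (rs.take k).all PySem.Chars.isdigit = true) :
    k ≤ (rs.takeWhile PySem.Chars.isdigit).length := by
  induction rs generalizing k with
  | nil => simpa using hk
  | cons r rs ih =>
    cases k with
    | zero => omega
    | succ k =>
      rw [List.take_succ_cons, List.all_cons, Bool.and_eq_true] at h
      simp [h.1]
      have := ih k (by simpa using hk) h.2
      omega

lemma all_drop_of_sufRun (cs : List Char) (k : Nat) (hk : k ≤ cs.length)
    (h : ((cs.drop (cs.length - k)).all PySem.Chars.isdigit) = true) : k ≤ sufRun cs := by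
  have hd : cs.drop (cs.length - k) = (cs.reverse.take k).reverse := by
    rw [← List.reverse_reverse cs, List.reverse_take]
    simp
  apply takeWhile_ge cs.reverse k (by simpa using hk)
  rw [hd] at h
  simpa using h

lemma slice_append_of_le (cs : List Char) (c : Char) (i : Int) (h0 : 0 ≤ i)
    (h4 : i + 4 ≤ (cs.length : Int)) :
    PySem.List.slice (cs ++ [c]) (some i) (some (i + 4)) =
      PySem.List.slice cs (some i) (some (i + 4)) := by
  rw [PySem.List.slice_toNat _ h0 (by omega), PySem.List.slice_toNat _ h0 (by omega)]
  have hle : i.toNat ≤ cs.length := by omega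
  rw [List.drop_append_of_le_length hle, List.take_append_of_le_length]
  simp [List.length_drop]
  omega

lemma aLoop_small (cs : List Char) (h : cs.length ≤ 3) : pvALoop cs = 0 := by
  rw [pvALoop, PySem.List.pyRange_one_eq_nil (by omega)]
  rfl

lemma aLoop_append (cs : List Char) (c : Char) (h : 3 ≤ cs.length) :
    pvALoop (cs ++ [c]) = pvAStep (cs ++ [c]) (pvALoop cs) ((cs.length : Int) - 3) := by
  have hlen : ((cs ++ [c]).length : Int) - 3 = ((cs.length : Int) - 3) + 1 := by
    simp; omega
  rw [pvALoop, hlen, PySem.List.pyRange_one_succ_right (by omega),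
    List.foldl_append]
  simp only [List.foldl_cons, List.foldl_nil]
  congr 1
  rw [pvALoop]
  apply PySem.List.foldl_congr_mem
  intro r i hi
  have hmem := (PySem.List.mem_pyRange_one).1 hi
  unfold pvAStep
  rw [slice_append_of_le cs c i hmem.1 (by omega)]

-- the last window of cs ++ [c] is (the last three chars of cs) ++ [c]
lemma slice_last_window (cs : List Char) (c : Char) (h : 3 ≤ cs.length) :
    PySem.List.slice (cs ++ [c]) (some ((cs.length : Int) - 3)) (some (((cs.length : Int) - 3) + 4)) =
      cs.drop (cs.length - 3) ++ [c] := by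
  rw [PySem.List.slice_toNat _ (by omega) (by omega)]
  have h1 : ((cs.length : Int) - 3).toNat = cs.length - 3 := by omega
  have h2 : (((cs.length : Int) - 3) + 4).toNat - ((cs.length : Int) - 3).toNat = 4 := by omega
  rw [h2, h1, List.drop_append_of_le_length (by omega)]
  apply List.take_of_length_le
  simp [List.length_drop]
  omega

-- the loop invariant tying B's state to A's accumulated result
def pvInv (cs : List Char) : Prop :=
  let st := cs.foldl pvBStep (0, 0, 0, 0, 0)
  st.1 = pvALoop cs ∧ st.2.1 = (sufRun cs : Int) ∧
  (1 ≤ sufRun cs → ∃ p c3, cs = p ++ [c3] ∧ PySem.Chars.isdigit c3 = true ∧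
    st.2.2.2.2 = pvVal c3) ∧
  (2 ≤ sufRun cs → ∃ p b c3, cs = p ++ [b, c3] ∧ PySem.Chars.isdigit b = true ∧
    PySem.Chars.isdigit c3 = true ∧ st.2.2.2.1 = pvVal b ∧ st.2.2.2.2 = pvVal c3) ∧
  (3 ≤ sufRun cs → ∃ p a b c3, cs = p ++ [a, b, c3] ∧ PySem.Chars.isdigit a = true ∧
    PySem.Chars.isdigit b = true ∧ PySem.Chars.isdigit c3 = true ∧
    st.2.2.1 = pvVal a ∧ st.2.2.2.1 = pvVal b ∧ st.2.2.2.2 = pvVal c3)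

lemma pvInv_holds (cs : List Char) : pvInv cs := by
  induction cs using List.reverseRecOn with
  | nil =>
    refine ⟨?_, by simp [sufRun], ?_, ?_, ?_⟩ <;>
      simp [pvALoop, sufRun]
  | append_singleton p c ih =>
    rcases hst : p.foldl pvBStep (0, 0, 0, 0, 0) with ⟨r, rn, d1, d2, d3⟩
    simp only [pvInv, hst] at ih
    obtain ⟨ihr, ihrun, ih1, ih2, ih3⟩ := ih
    simp only [pvInv, List.foldl_append, List.foldl_cons, List.foldl_nil, hst]
    by_cases hc : PySem.Chars.isdigit c = true
    · simp only [pvBStep, hc, if_true]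
      refine ⟨?_, ?_, ?_, ?_, ?_⟩
      · -- result component
        by_cases h3 : 3 ≤ sufRun p
        · obtain ⟨q, a, b, c3, hq, hda, hdb, hdc3, hv1, hv2, hv3⟩ := ih3 h3
          subst hq
          have hlen : (q ++ [a, b, c3]).length = q.length + 3 := by simp
          rw [if_pos (by rw [ihrun]; omega)]
          rw [aLoop_append _ _ (by omega), pvAStep]
          rw [slice_last_window _ _ (by omega)]
          have hdrop : (q ++ [a, b, c3]).drop ((q ++ [a, b, c3]).length - 3) = [a, b, c3] := by
            rw [hlen]
            simp
          rw [hdrop]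
          simp only [List.all_cons, List.all_nil, List.all_append, hda, hdb, hdc3, hc,
            Bool.and_self, if_true]
          simp only [List.cons_append, List.nil_append]
          simp only [pvReduce, List.map, List.foldl]
          rw [hv1, hv2, hv3, ← ihr, Int.max_def]
          split_ifs <;> omega
        · rw [if_neg (by rw [ihrun]; omega)]
          by_cases hl : p.length ≤ 2
          · rw [aLoop_small _ (by simp; omega), ihr, aLoop_small _ (by omega)]
          · rw [aLoop_append _ _ (by omega), pvAStep, slice_last_window _ _ (by omega)]
            have hfalse : (p.drop (p.length - 3)).all PySem.Chars.isdigit = false := by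
              cases hall : (p.drop (p.length - 3)).all PySem.Chars.isdigit with
              | true => exact absurd (all_drop_of_sufRun p 3 (by omega) hall) h3
              | false => rfl
            simp [List.all_append, hfalse, ihr]
      · -- run component
        rw [sufRun_append, if_pos hc, ihrun]
        push_cast
        ring
      · -- I1
        intro _
        exact ⟨p, c, rfl, hc, rfl⟩
      · -- I2
        intro h2'
        rw [sufRun_append, if_pos hc] at h2'
        obtain ⟨q, c3, hq, hd3, hv3⟩ := ih1 (by omega)
        exact ⟨q, c3, c, by rw [hq]; simp, hd3, hc, hv3, rfl⟩
      · -- I3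
        intro h3'
        rw [sufRun_append, if_pos hc] at h3'
        obtain ⟨q, b, c3, hq, hdb, hdc3, hv2, hv3⟩ := ih2 (by omega)
        exact ⟨q, b, c3, c, by rw [hq]; simp, hdb, hdc3, hc, hv2, hv3, rfl⟩
    · simp only [pvBStep, hc, if_false, Bool.false_eq_true]
      have hsr : sufRun (p ++ [c]) = 0 := by rw [sufRun_append, if_neg hc]
      refine ⟨?_, by simp [hsr], by rw [hsr]; omega, by rw [hsr]; omega, by rw [hsr]; omega⟩
      by_cases hl : p.length ≤ 2
      · rw [aLoop_small _ (by simp; omega), ihr, aLoop_small _ (by omega)]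
      · rw [aLoop_append _ _ (by omega), pvAStep, slice_last_window _ _ (by omega)]
        simp [List.all_append, hc, ihr]

-- ===== VERDICT (by name: the statement is the Claim_ definition above) =====
theorem max_multiplication_spec : Claim_equal_max_multiplication := by
  intro text _
  have h := (pvInv_holds text.toList).1
  simp only [Spec_max_multiplication, max_multiplication, max_multiplication_alt, h]
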